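-- pv_equiv track=rewrite | github.com/victorvic54/leetcode | 3030_find_the_grid_of_region_average.py | isValidRegion
-- ===== SOURCE A (Python) =====
-- def isValidRegion(image, i, j, threshold):
--     directions = [(0,1), (0,-1), (-1,0), (1,0)]
--     limit_x = i + 2
--     limit_y = j + 2
--     for x in range(i, i + 3):
--         for y in range(j, j + 3):
--             for direction in directions:
--                 next_x = x + direction[0]
--                 next_y = y + direction[1]
--                 if 0 <= next_x < len(image) and i <= next_x <= limit_x and 0 <= next_y < len(image[0]) and j <= next_y <= limit_y:
--                     if abs(image[next_x][next_y]-image[x][y]) > threshold: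
--                         return False
--     return True
-- ===== SOURCE B (Python) =====
-- def isValidRegion(image, i, j, threshold):
--     # Clamp the 3x3 region to the grid once, then compare each adjacent pair of
--     # the clamped window exactly once: right neighbours, then down neighbours.
--     H = len(image)
--     W = len(image[0]) if len(image) > 0 else 0
--     x0, x1 = max(i, 0), min(i + 3, H)
--     y0, y1 = max(j, 0), min(j + 3, W)
--     for x in range(x0, x1):
--         for y in range(y0, y1 - 1):
--             if abs(image[x][y + 1] - image[x][y]) > threshold:
--                 return False
--     for x in range(x0, x1 - 1):
--         for y in range(y0, y1):
--             if abs(image[x + 1][y] - image[x][y]) > threshold: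
--                 return False
--     return True
-- ===== Notes on version B (the rewrite author's own statement) =====
-- stated objective: simpler
-- what changed: Replaced the 9-cell x 4-directions scan with its per-pair redundant bounds guards by clamping the 3x3 region to the grid once and then comparing each horizontally and then each vertically adjacent pair of the clamped window exactly once; Pre_ excludes regions partly overlapping the grid on the negative side and ragged images whose region rows are longer than row 0, where A's returned value is an accident of Python negative-index wraparound / unguarded current-cell indexing.
-- outside the precondition, e.g. on isValidRegion([[0, 0, 0], [0, 0, 0], [9, 0, 0]], -1, 0, 0): A returns False, B returns True; on isValidRegion([[0, 0], [0, 0, 9], [0, 0, 0], [0, 0, 0]], 1, 0, 0): A returns False, B returns True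
import Mathlib
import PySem

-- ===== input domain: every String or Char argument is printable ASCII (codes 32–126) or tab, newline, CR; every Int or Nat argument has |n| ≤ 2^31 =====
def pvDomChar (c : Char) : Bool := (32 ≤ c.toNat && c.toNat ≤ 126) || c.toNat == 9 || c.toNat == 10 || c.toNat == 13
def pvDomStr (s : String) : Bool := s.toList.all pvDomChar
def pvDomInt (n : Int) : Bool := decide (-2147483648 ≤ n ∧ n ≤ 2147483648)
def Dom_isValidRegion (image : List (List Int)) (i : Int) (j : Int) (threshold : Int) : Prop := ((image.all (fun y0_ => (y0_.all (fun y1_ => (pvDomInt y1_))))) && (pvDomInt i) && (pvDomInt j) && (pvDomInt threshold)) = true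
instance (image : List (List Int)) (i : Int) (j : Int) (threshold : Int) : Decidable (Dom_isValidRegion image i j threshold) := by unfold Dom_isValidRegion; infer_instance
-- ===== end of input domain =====

-- B clamps the 3x3 region to the grid once and compares each adjacent pair of the clamped
-- window exactly once (right neighbours, then down neighbours): simpler, no directions list.

-- shared indexing primitive: image[x][y] with Python semantics (total via default; Pre_ keeps it in range)
def pvCell (image : List (List Int)) (x y : Int) : Int :=
  PySem.List.pyGetD (PySem.List.pyGetD image x []) y 0

-- ===== PORT A =====
def isValidRegion (image : List (List Int)) (i : Int) (j : Int) (threshold : Int) : Bool :=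
  let directions : List (Int × Int) := [(0,1), (0,-1), (-1,0), (1,0)]
  let limit_x := i + 2
  let limit_y := j + 2
  (PySem.List.pyRange i (i + 3) 1).all fun x =>
    (PySem.List.pyRange j (j + 3) 1).all fun y =>
      directions.all fun direction =>
        let next_x := x + direction.1
        let next_y := y + direction.2
        if 0 ≤ next_x ∧ next_x < (image.length : Int) ∧ i ≤ next_x ∧ next_x ≤ limit_x ∧
           0 ≤ next_y ∧ next_y < ((PySem.List.pyGetD image 0 []).length : Int) ∧ j ≤ next_y ∧ next_y ≤ limit_y then
          !decide (((pvCell image next_x next_y - pvCell image x y).natAbs : Int) > threshold)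
        else true

-- ===== PORT B =====
def isValidRegion_alt (image : List (List Int)) (i : Int) (j : Int) (threshold : Int) : Bool :=
  let H : Int := image.length
  let W : Int := if 0 < ((image.length : Int)) then ((PySem.List.pyGetD image 0 []).length : Int) else 0
  let x0 := max i 0
  let x1 := min (i + 3) H
  let y0 := max j 0
  let y1 := min (j + 3) W
  ((PySem.List.pyRange x0 x1 1).all fun x =>
    (PySem.List.pyRange y0 (y1 - 1) 1).all fun y =>
      !decide (((pvCell image x (y + 1) - pvCell image x y).natAbs : Int) > threshold)) &&
  ((PySem.List.pyRange x0 (x1 - 1) 1).all fun x =>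
    (PySem.List.pyRange y0 y1 1).all fun y =>
      !decide (((pvCell image (x + 1) y - pvCell image x y).natAbs : Int) > threshold))

-- ===== PRECONDITION & SPEC =====
-- Pre_ excludes regions that only partly overlap the grid on the negative side (A then compares
-- cells fetched via Python negative-index wraparound) and ragged images whose region rows are
-- longer than row 0 (A then compares cells beyond its guard window): on those inputs A's returned
-- value is an accident of its indexing; everywhere else A raises or the region misses / fits the grid.
def Pre_isValidRegion (image : List (List Int)) (i : Int) (j : Int) (threshold : Int) : Prop :=
  (((image.length : Int)) ≤ i ∨ i + 2 < 0) ∨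
  ((0 ≤ i ∧ i + 3 ≤ ((image.length : Int))) ∧
    ((((PySem.List.pyGetD image 0 []).length : Int) ≤ j ∨ j + 2 < 0) ∨
      ((0 ≤ j ∧ j + 3 ≤ ((PySem.List.pyGetD image 0 []).length : Int)) ∧
        j + 3 ≤ ((PySem.List.pyGetD image i []).length : Int) ∧
        j + 3 ≤ ((PySem.List.pyGetD image (i + 1) []).length : Int) ∧
        j + 3 ≤ ((PySem.List.pyGetD image (i + 2) []).length : Int))))
instance (image : List (List Int)) (i : Int) (j : Int) (threshold : Int) : Decidable (Pre_isValidRegion image i j threshold) := by unfold Pre_isValidRegion; infer_instance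

def pvWitness_isValidRegion : List (List Int) × Int × Int × Int :=
  ([[1, 2, 3], [2, 3, 4], [3, 4, 5]], 0, 0, 1)

def Spec_isValidRegion (image : List (List Int)) (i : Int) (j : Int) (threshold : Int) (out : Bool) : Prop := out = isValidRegion_alt image i j threshold
instance (image : List (List Int)) (i : Int) (j : Int) (threshold : Int) (out : Bool) : Decidable (Spec_isValidRegion image i j threshold out) := by unfold Spec_isValidRegion; infer_instance

-- ===== CLAIM (what is proved, stated in full; the proofs are below) =====
def Claim_equal_isValidRegion : Prop := ∀ (image : List (List Int)) (i : Int) (j : Int) (threshold : Int), Dom_isValidRegion image i j threshold → Pre_isValidRegion image i j threshold → Spec_isValidRegion image i j threshold (isValidRegion image i j threshold)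

-- ===== LEMMAS AND PROOFS =====

theorem pvRange3 (a : Int) : PySem.List.pyRange a (a + 3) 1 = [a, a + 1, a + 1 + 1] := by
  rw [PySem.List.pyRange_one_cons (by omega), PySem.List.pyRange_one_cons (by omega),
      PySem.List.pyRange_one_cons (by omega), PySem.List.pyRange_one_eq_nil (by omega)]

theorem pvRange2 (a : Int) : PySem.List.pyRange a (a + 2) 1 = [a, a + 1] := by
  rw [PySem.List.pyRange_one_cons (by omega), PySem.List.pyRange_one_cons (by omega),
      PySem.List.pyRange_one_eq_nil (by omega)]

theorem pvIteGuard {c : Prop} [Decidable c] {b : Bool} :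
    ((if c then b else true) = true) ↔ (c → b = true) := by
  split <;> simp_all

-- ===== VERDICT (by name: the statement is the Claim_ definition above) =====
set_option maxHeartbeats 2000000 in
theorem isValidRegion_spec : Claim_equal_isValidRegion := by
  intro image i j threshold _hdom hpre
  unfold Pre_isValidRegion at hpre
  unfold Spec_isValidRegion
  rcases hpre with hxe | ⟨⟨hi, hxH⟩, hye | ⟨⟨hj, hyW⟩, hr0, hr1, hr2⟩⟩
  · -- the region misses the grid vertically: A's guards all fail, B's clamped x-range is empty
    have hB : isValidRegion_alt image i j threshold = true := by
      simp only [isValidRegion_alt,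
        show PySem.List.pyRange (max i 0) (min (i + 3) ((image.length : Int))) 1 = [] from PySem.List.pyRange_one_eq_nil (by omega),
        show PySem.List.pyRange (max i 0) (min (i + 3) ((image.length : Int)) - 1) 1 = [] from PySem.List.pyRange_one_eq_nil (by omega),
        List.all_nil, Bool.and_self]
    have hA : isValidRegion image i j threshold = true := by
      unfold isValidRegion
      simp only [pvRange3, List.all_cons, List.all_nil, Bool.and_eq_true, pvIteGuard, and_true]
      ring_nf
      rcases hxe with h | h
      · simp only [show (i < ((image.length : Int))) = False from eq_false (by omega),
          show (1 + i < ((image.length : Int))) = False from eq_false (by omega),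
          show (2 + i < ((image.length : Int))) = False from eq_false (by omega),
          show (i ≤ -1 + i) = False from eq_false (by omega),
          show (3 + i ≤ 2 + i) = False from eq_false (by omega),
          false_and, and_false, false_implies, and_self]
      · simp only [show (0 ≤ i) = False from eq_false (by omega),
          show (0 ≤ 1 + i) = False from eq_false (by omega),
          show (0 ≤ 2 + i) = False from eq_false (by omega),
          show (0 ≤ -1 + i) = False from eq_false (by omega),
          show (3 + i ≤ 2 + i) = False from eq_false (by omega),
          false_and, and_false, false_implies, and_self]
    rw [hA, hB]
  · -- the region misses the grid horizontally: A's y-guards all fail, B's clamped y-range is empty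
    have hB : isValidRegion_alt image i j threshold = true := by
      simp only [isValidRegion_alt,
        show (if 0 < ((image.length : Int)) then ((PySem.List.pyGetD image 0 []).length : Int) else 0) = ((PySem.List.pyGetD image 0 []).length : Int) from if_pos (by omega),
        show PySem.List.pyRange (max j 0) (min (j + 3) ((PySem.List.pyGetD image 0 []).length : Int)) 1 = [] from PySem.List.pyRange_one_eq_nil (by omega),
        show PySem.List.pyRange (max j 0) (min (j + 3) ((PySem.List.pyGetD image 0 []).length : Int) - 1) 1 = [] from PySem.List.pyRange_one_eq_nil (by omega),
        List.all_nil]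
      simp
    have hA : isValidRegion image i j threshold = true := by
      unfold isValidRegion
      simp only [pvRange3, List.all_cons, List.all_nil, Bool.and_eq_true, pvIteGuard, and_true]
      ring_nf
      rcases hye with h | h
      · simp only [show (j < ((PySem.List.pyGetD image 0 []).length : Int)) = False from eq_false (by omega),
          show (1 + j < ((PySem.List.pyGetD image 0 []).length : Int)) = False from eq_false (by omega),
          show (2 + j < ((PySem.List.pyGetD image 0 []).length : Int)) = False from eq_false (by omega),
          show (j ≤ -1 + j) = False from eq_false (by omega),
          show (3 + j ≤ 2 + j) = False from eq_false (by omega),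
          false_and, and_false, false_implies, and_self]
      · simp only [show (0 ≤ j) = False from eq_false (by omega),
          show (0 ≤ 1 + j) = False from eq_false (by omega),
          show (0 ≤ 2 + j) = False from eq_false (by omega),
          show (0 ≤ -1 + j) = False from eq_false (by omega),
          show (3 + j ≤ 2 + j) = False from eq_false (by omega),
          false_and, and_false, false_implies, and_self]
    rw [hA, hB]
  · -- the region lies fully inside the grid: B's clamps are the identity and each pair matches
    unfold isValidRegion isValidRegion_alt
    simp only [show (if 0 < ((image.length : Int)) then ((PySem.List.pyGetD image 0 []).length : Int) else 0) = ((PySem.List.pyGetD image 0 []).length : Int) from if_pos (by omega),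
      show max i 0 = i from by omega,
      show min (i + 3) ((image.length : Int)) = i + 3 from by omega,
      show max j 0 = j from by omega,
      show min (j + 3) ((PySem.List.pyGetD image 0 []).length : Int) = j + 3 from by omega,
      show i + 3 - 1 = i + 2 from by omega,
      show j + 3 - 1 = j + 2 from by omega]
    rw [Bool.eq_iff_iff]
    simp only [pvRange3, pvRange2, List.all_cons, List.all_nil, Bool.and_eq_true, pvIteGuard,
      Bool.not_eq_eq_eq_not, Bool.not_true, decide_eq_false_iff_not, not_lt, and_true]
    ring_nf
    rw [show ((pvCell image (1 + i) (1 + j) - pvCell image (1 + i) (2 + j)).natAbs) = ((-pvCell image (1 + i) (1 + j) + pvCell image (1 + i) (2 + j)).natAbs) from by omega]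
    rw [show ((pvCell image (1 + i) (1 + j) - pvCell image (2 + i) (1 + j)).natAbs) = ((-pvCell image (1 + i) (1 + j) + pvCell image (2 + i) (1 + j)).natAbs) from by omega]
    rw [show ((pvCell image (1 + i) (2 + j) - pvCell image (2 + i) (2 + j)).natAbs) = ((-pvCell image (1 + i) (2 + j) + pvCell image (2 + i) (2 + j)).natAbs) from by omega]
    rw [show ((pvCell image (1 + i) j - pvCell image (1 + i) (1 + j)).natAbs) = ((-pvCell image (1 + i) j + pvCell image (1 + i) (1 + j)).natAbs) from by omega]
    rw [show ((pvCell image (1 + i) j - pvCell image (2 + i) j).natAbs) = ((-pvCell image (1 + i) j + pvCell image (2 + i) j).natAbs) from by omega]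
    rw [show ((pvCell image (2 + i) (1 + j) - pvCell image (2 + i) (2 + j)).natAbs) = ((-pvCell image (2 + i) (1 + j) + pvCell image (2 + i) (2 + j)).natAbs) from by omega]
    rw [show ((pvCell image (2 + i) j - pvCell image (2 + i) (1 + j)).natAbs) = ((-pvCell image (2 + i) j + pvCell image (2 + i) (1 + j)).natAbs) from by omega]
    rw [show ((pvCell image i (1 + j) - pvCell image (1 + i) (1 + j)).natAbs) = ((-pvCell image i (1 + j) + pvCell image (1 + i) (1 + j)).natAbs) from by omega]
    rw [show ((pvCell image i (1 + j) - pvCell image i (2 + j)).natAbs) = ((-pvCell image i (1 + j) + pvCell image i (2 + j)).natAbs) from by omega]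
    rw [show ((pvCell image i (1 + j) - pvCell image i j).natAbs) = ((-pvCell image i (1 + j) + pvCell image i j).natAbs) from by omega]
    rw [show ((pvCell image i (2 + j) - pvCell image (1 + i) (2 + j)).natAbs) = ((-pvCell image i (2 + j) + pvCell image (1 + i) (2 + j)).natAbs) from by omega]
    rw [show ((pvCell image i j - pvCell image (1 + i) j).natAbs) = ((-pvCell image i j + pvCell image (1 + i) j).natAbs) from by omega]
    generalize (-pvCell image (1 + i) (1 + j) + pvCell image (1 + i) (2 + j)).natAbs = pvN0
    generalize (-pvCell image (1 + i) (1 + j) + pvCell image (2 + i) (1 + j)).natAbs = pvN1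
    generalize (-pvCell image (1 + i) (2 + j) + pvCell image (1 + i) (3 + j)).natAbs = pvN2
    generalize (-pvCell image (1 + i) (2 + j) + pvCell image (2 + i) (2 + j)).natAbs = pvN3
    generalize (-pvCell image (1 + i) j + pvCell image (1 + i) (-1 + j)).natAbs = pvN4
    generalize (-pvCell image (1 + i) j + pvCell image (1 + i) (1 + j)).natAbs = pvN5
    generalize (-pvCell image (1 + i) j + pvCell image (2 + i) j).natAbs = pvN6
    generalize (-pvCell image (2 + i) (1 + j) + pvCell image (2 + i) (2 + j)).natAbs = pvN7
    generalize (-pvCell image (2 + i) (1 + j) + pvCell image (3 + i) (1 + j)).natAbs = pvN8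
    generalize (-pvCell image (2 + i) (2 + j) + pvCell image (2 + i) (3 + j)).natAbs = pvN9
    generalize (-pvCell image (2 + i) (2 + j) + pvCell image (3 + i) (2 + j)).natAbs = pvN10
    generalize (-pvCell image (2 + i) j + pvCell image (2 + i) (-1 + j)).natAbs = pvN11
    generalize (-pvCell image (2 + i) j + pvCell image (2 + i) (1 + j)).natAbs = pvN12
    generalize (-pvCell image (2 + i) j + pvCell image (3 + i) j).natAbs = pvN13
    generalize (-pvCell image i (1 + j) + pvCell image (-1 + i) (1 + j)).natAbs = pvN14
    generalize (-pvCell image i (1 + j) + pvCell image (1 + i) (1 + j)).natAbs = pvN15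
    generalize (-pvCell image i (1 + j) + pvCell image i (2 + j)).natAbs = pvN16
    generalize (-pvCell image i (1 + j) + pvCell image i j).natAbs = pvN17
    generalize (-pvCell image i (2 + j) + pvCell image (-1 + i) (2 + j)).natAbs = pvN18
    generalize (-pvCell image i (2 + j) + pvCell image (1 + i) (2 + j)).natAbs = pvN19
    generalize (-pvCell image i (2 + j) + pvCell image i (3 + j)).natAbs = pvN20
    generalize (-pvCell image i j + pvCell image (-1 + i) j).natAbs = pvN21
    generalize (-pvCell image i j + pvCell image (1 + i) j).natAbs = pvN22
    generalize (-pvCell image i j + pvCell image i (-1 + j)).natAbs = pvN23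
    simp only [show (0 ≤ i) = True from eq_true (by omega),
      show (i < (image.length : Int)) = True from eq_true (by omega),
      show (i ≤ i) = True from eq_true (by omega),
      show (i ≤ 2 + i) = True from eq_true (by omega),
      show (0 ≤ 1 + i) = True from eq_true (by omega),
      show (1 + i < (image.length : Int)) = True from eq_true (by omega),
      show (i ≤ 1 + i) = True from eq_true (by omega),
      show (1 + i ≤ 2 + i) = True from eq_true (by omega),
      show (0 ≤ 2 + i) = True from eq_true (by omega),
      show (2 + i < (image.length : Int)) = True from eq_true (by omega),
      show (2 + i ≤ 2 + i) = True from eq_true (by omega),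
      show (i ≤ -1 + i) = False from eq_false (by omega),
      show (3 + i ≤ 2 + i) = False from eq_false (by omega),
      show (0 ≤ j) = True from eq_true (by omega),
      show (j < ((PySem.List.pyGetD image 0 []).length : Int)) = True from eq_true (by omega),
      show (j ≤ j) = True from eq_true (by omega),
      show (j ≤ 2 + j) = True from eq_true (by omega),
      show (0 ≤ 1 + j) = True from eq_true (by omega),
      show (1 + j < ((PySem.List.pyGetD image 0 []).length : Int)) = True from eq_true (by omega),
      show (j ≤ 1 + j) = True from eq_true (by omega),
      show (1 + j ≤ 2 + j) = True from eq_true (by omega),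
      show (0 ≤ 2 + j) = True from eq_true (by omega),
      show (2 + j < ((PySem.List.pyGetD image 0 []).length : Int)) = True from eq_true (by omega),
      show (2 + j ≤ 2 + j) = True from eq_true (by omega),
      show (j ≤ -1 + j) = False from eq_false (by omega),
      show (3 + j ≤ 2 + j) = False from eq_false (by omega),
      true_and, and_true, false_and, and_false, true_implies, false_implies, and_self]
    constructor <;> intro hfwd <;> simp_all
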